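-- pv_equiv track=rewrite | github.com/Yong-Zhuang/Tutoring | Coding/Amazon/student-rank-imbalance.py | solve
-- ===== SOURCE A (Python) =====
-- def next_great_element_right(arr):
--     n = len(arr)
--     res = [n] * n
--     # keep non-increasing monotonic array, like 4, 1, 3, 2
--     stack = []
--     for i in range(n):
--         while stack and arr[i] > arr[stack[-1]]:
--             res[stack.pop()] = i
--         stack.append(i)
--     return res
--
-- def next_great_element_left(arr):
--     n = len(arr)
--     res = [-1] * n
--     stack = []
--     for i in range(n - 1, -1, -1):
--         while stack and arr[i] > arr[stack[-1]]:
--             res[stack.pop()] = i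
--         stack.append(i)
--     return res
--
-- def solve(rank):
--     n = len(rank)
--     # exclusive boundary
--     left_boundary = [-1] * n
--     right_boundary = [n] * n
--     mp = {}
--     # calculate left boundary
--     for i in range(n):
--         if rank[i] + 1 in mp:
--             left_boundary[i] = mp[rank[i] + 1]
--         mp[rank[i]] = i
--
--     # calculate right boundary
--     mp = {}
--     for i in range(n - 1, -1, -1):
--         if rank[i] + 1 in mp:
--             right_boundary[i] = mp[rank[i] + 1]
--         mp[rank[i]] = i
--
--     nge_right = next_great_element_right(rank)
--     nge_left = next_great_element_left(rank)
--
--     # calculate possibility of how the i-th number can contribute as a[i-1]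
--     res = 0
--     for i in range(n):
--         # possible start value of the sub-array
--
--         count_of_start = i - left_boundary[i]
--         count_of_end = right_boundary[i] - i
--         total_possible = count_of_start * count_of_end
--         smaller_sub_count = (i - nge_left[i]) * (nge_right[i] - i)
--         res += (total_possible - smaller_sub_count)
--     return res
-- ===== SOURCE B (Python) =====
-- def _prev_match(rank, i, pred):
--     # nearest j < i with pred(rank[j]), else -1
--     for j in range(i - 1, -1, -1):
--         if pred(rank[j]):
--             return j
--     return -1
--
--
-- def _next_match(rank, i, n, pred):
--     # nearest j > i with pred(rank[j]), else n
--     for j in range(i + 1, n):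
--         if pred(rank[j]):
--             return j
--     return n
--
--
-- def solve(rank):
--     n = len(rank)
--     total = 0
--     for i in range(n):
--         v = rank[i]
--         lb = _prev_match(rank, i, lambda x: x == v + 1)
--         rb = _next_match(rank, i, n, lambda x: x == v + 1)
--         gl = _prev_match(rank, i, lambda x: x > v)
--         gr = _next_match(rank, i, n, lambda x: x > v)
--         total += (i - lb) * (rb - i) - (i - gl) * (gr - i)
--     return total
-- ===== Notes on version B (the rewrite author's own statement) =====
-- stated objective: simpler
-- what changed: Replaced the two hash-map boundary passes and the two monotonic-stack next-greater passes with direct per-index nearest-match scans (nearest previous/next index whose value equals rank[i]+1 or exceeds rank[i]), summing the same contribution formula in one loop.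
import Mathlib
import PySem

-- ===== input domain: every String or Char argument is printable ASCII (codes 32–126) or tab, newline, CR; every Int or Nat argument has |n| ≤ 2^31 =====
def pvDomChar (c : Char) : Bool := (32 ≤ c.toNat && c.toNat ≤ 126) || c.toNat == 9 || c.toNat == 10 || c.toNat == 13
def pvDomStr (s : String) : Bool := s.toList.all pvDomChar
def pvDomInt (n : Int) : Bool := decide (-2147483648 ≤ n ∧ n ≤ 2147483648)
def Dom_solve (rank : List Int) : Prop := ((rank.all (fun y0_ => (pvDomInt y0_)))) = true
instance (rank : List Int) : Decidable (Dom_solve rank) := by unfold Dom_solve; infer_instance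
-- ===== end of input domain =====

-- B replaces A's hash-map boundary passes and monotonic-stack next-greater passes by direct
-- per-index nearest-match scans (simpler, not faster).

-- ===== PORT A =====
-- the inner `while stack and arr[i] > arr[stack[-1]]: res[stack.pop()] = i` loop, shared verbatim by
-- both next_great_element_* functions; Lean list head = Python stack[-1]; every index the loops
-- produce is in range, so `getD _ 0` is exact for Python's arr[...]
def popLoop (arr : List Int) : List Int → List Nat → Nat → List Int × List Nat
  | res, [], _ => (res, [])
  | res, t :: rest, i =>
    if arr.getD i 0 > arr.getD t 0 then popLoop arr (res.set t (i : Int)) rest i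
    else (res, t :: rest)

def ngeStep (arr : List Int) (st : List Int × List Nat) (i : Nat) : List Int × List Nat :=
  let p := popLoop arr st.1 st.2 i
  (p.1, i :: p.2)

def nextGreatRight (arr : List Int) : List Int :=
  ((List.range arr.length).foldl (ngeStep arr)
    (List.replicate arr.length ((arr.length : Nat) : Int), [])).1

-- range(n-1,-1,-1) = (List.range n).reverse
def nextGreatLeft (arr : List Int) : List Int :=
  (((List.range arr.length).reverse).foldl (ngeStep arr)
    (List.replicate arr.length (-1 : Int), [])).1

-- the body `if rank[i]+1 in mp: boundary[i] = mp[rank[i]+1]; mp[rank[i]] = i`, shared verbatim by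
-- the two boundary loops of solve
def boundStep (rank : List Int) (st : List Int × PySem.Dict Int Int) (i : Nat) :
    List Int × PySem.Dict Int Int :=
  (match st.2.get? (rank.getD i 0 + 1) with
   | some j => st.1.set i j
   | none => st.1,
   st.2.insert (rank.getD i 0) ((i : Nat) : Int))

def leftBoundary (rank : List Int) : List Int :=
  ((List.range rank.length).foldl (boundStep rank)
    (List.replicate rank.length (-1 : Int), PySem.Dict.empty)).1

def rightBoundary (rank : List Int) : List Int :=
  (((List.range rank.length).reverse).foldl (boundStep rank)
    (List.replicate rank.length ((rank.length : Nat) : Int), PySem.Dict.empty)).1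

def solve (rank : List Int) : Int :=
  let n := rank.length
  let lb := leftBoundary rank
  let rb := rightBoundary rank
  let ngeR := nextGreatRight rank
  let ngeL := nextGreatLeft rank
  (List.range n).foldl (fun (res : Int) (i : Nat) =>
    let countStart := (i : Int) - lb.getD i 0
    let countEnd := rb.getD i 0 - (i : Int)
    let totalPossible := countStart * countEnd
    let smallerSub := ((i : Int) - ngeL.getD i 0) * (ngeR.getD i 0 - (i : Int))
    res + (totalPossible - smallerSub)) 0

-- ===== PORT B =====
-- `for j in range(i-1,-1,-1): if pred(rank[j]): return j` then `return -1`
def prevMatch (rank : List Int) (p : Int → Bool) : Nat → Int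
  | 0 => -1
  | j + 1 => if p (rank.getD j 0) then ((j : Nat) : Int) else prevMatch rank p j

-- `for j in range(i+1,n): if pred(rank[j]): return j` then `return n`  (called with j = i+1;
-- the first-match early return over range(j,n) is List.find? over that index list)
def nextMatch (rank : List Int) (p : Int → Bool) (n : Nat) (j : Nat) : Int :=
  match (List.range' j (n - j)).find? (fun k => p (rank.getD k 0)) with
  | some k => ((k : Nat) : Int)
  | none => ((n : Nat) : Int)

def solve_alt (rank : List Int) : Int :=
  let n := rank.length
  (List.range n).foldl (fun (total : Int) (i : Nat) =>
    let v := rank.getD i 0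
    let lb := prevMatch rank (fun x => x == v + 1) i
    let rb := nextMatch rank (fun x => x == v + 1) n (i + 1)
    let gl := prevMatch rank (fun x => x > v) i
    let gr := nextMatch rank (fun x => x > v) n (i + 1)
    total + ((i : Int) - lb) * (rb - (i : Int)) - ((i : Int) - gl) * (gr - (i : Int))) 0

-- ===== PRECONDITION & SPEC =====
def Spec_solve (rank : List Int) (out : Int) : Prop := out = solve_alt rank
instance (rank : List Int) (out : Int) : Decidable (Spec_solve rank out) := by unfold Spec_solve; infer_instance

-- ===== CLAIM (what is proved, stated in full; the proofs are below) =====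
def Claim_equal_solve : Prop := ∀ (rank : List Int), Dom_solve rank → Spec_solve rank (solve rank)

-- ===== LEMMAS AND PROOFS =====

-- characterizations of B's scans
theorem prevMatch_eq_neg (rank : List Int) (p : Int → Bool) (i : Nat)
    (h : ∀ m, m < i → p (rank.getD m 0) = false) : prevMatch rank p i = -1 := by
  induction i with
  | zero => rfl
  | succ j ih =>
    simp only [prevMatch, h j (Nat.lt_succ_self j)]
    exact ih (fun m hm => h m (Nat.lt_succ_of_lt hm))

theorem prevMatch_eq (rank : List Int) (p : Int → Bool) (k i : Nat)
    (hk : k < i) (hp : p (rank.getD k 0) = true)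
    (hm : ∀ m, k < m → m < i → p (rank.getD m 0) = false) :
    prevMatch rank p i = ((k : Nat) : Int) := by
  induction i with
  | zero => omega
  | succ j ih =>
    by_cases hkj : k = j
    · subst hkj; simp only [prevMatch, hp]; rfl
    · have hkj' : k < j := by omega
      simp only [prevMatch, hm j hkj' (Nat.lt_succ_self j)]
      exact ih hkj' (fun m h1 h2 => hm m h1 (Nat.lt_succ_of_lt h2))

theorem nextMatch_ge (rank : List Int) (p : Int → Bool) (n s : Nat) (h : n ≤ s) :
    nextMatch rank p n s = ((n : Nat) : Int) := by
  simp [nextMatch, Nat.sub_eq_zero_of_le h]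

theorem nextMatch_unfold (rank : List Int) (p : Int → Bool) (n s : Nat) (h : s < n) :
    nextMatch rank p n s =
      if p (rank.getD s 0) then ((s : Nat) : Int) else nextMatch rank p n (s + 1) := by
  have h1 : n - s = (n - (s + 1)) + 1 := by omega
  simp only [nextMatch, h1, List.range'_succ, List.find?_cons]
  cases hp : p (rank.getD s 0) <;> simp [hp, List.getD]

theorem nextMatch_eq_n (rank : List Int) (p : Int → Bool) (n : Nat) :
    ∀ s, (∀ m, s ≤ m → m < n → p (rank.getD m 0) = false) →
    nextMatch rank p n s = ((n : Nat) : Int) := by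
  intro s
  induction hd : n - s generalizing s with
  | zero => intro _; exact nextMatch_ge rank p n s (by omega)
  | succ d ih =>
    intro h
    have hs : s < n := by omega
    have hps : p (rank.getD s 0) = false := h s le_rfl hs
    rw [nextMatch_unfold rank p n s hs, hps, if_neg (by decide)]
    exact ih (s + 1) (by omega) (fun m h1 h2 => h m (by omega) h2)

theorem nextMatch_eq (rank : List Int) (p : Int → Bool) (n k : Nat)
    (hk : k < n) (hp : p (rank.getD k 0) = true) :
    ∀ s, s ≤ k → (∀ m, s ≤ m → m < k → p (rank.getD m 0) = false) →
    nextMatch rank p n s = ((k : Nat) : Int) := by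
  intro s
  induction hd : k - s generalizing s with
  | zero =>
    intro hsk _
    have : s = k := by omega
    subst this
    rw [nextMatch_unfold rank p n s hk, hp]; simp
  | succ d ih =>
    intro hsk h
    have hs : s < n := by omega
    have hps : p (rank.getD s 0) = false := h s le_rfl (by omega)
    rw [nextMatch_unfold rank p n s hs, hps, if_neg (by decide)]
    exact ih (s + 1) (by omega) (by omega) (fun m h1 h2 => h m (by omega) h2)

-- generic list facts used by the invariant proofs
theorem getD_foldl_set_not_mem (k : Nat) (w : Int) : ∀ (l : List Nat) (res : List Int), k ∉ l →
    (l.foldl (fun r t => r.set t w) res).getD k 0 = res.getD k 0 := by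
  intro l
  induction l with
  | nil => intro res _; rfl
  | cons t ts ih =>
    intro res hk
    simp only [List.foldl_cons]
    rw [ih _ (fun h => hk (List.mem_cons_of_mem _ h))]
    have : t ≠ k := fun h => hk (h ▸ List.mem_cons_self)
    simp [List.getD_eq_getElem?_getD, List.getElem?_set_ne this]

theorem length_foldl_set (w : Int) : ∀ (l : List Nat) (res : List Int),
    (l.foldl (fun r t => r.set t w) res).length = res.length := by
  intro l
  induction l with
  | nil => intro res; rfl
  | cons t ts ih => intro res; simp [List.foldl_cons, ih]

theorem getD_foldl_set_mem (k : Nat) (w : Int) : ∀ (l : List Nat) (res : List Int), k ∈ l →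
    l.Nodup → k < res.length → (l.foldl (fun r t => r.set t w) res).getD k 0 = w := by
  intro l
  induction l with
  | nil => intro res h; cases h
  | cons t ts ih =>
    intro res hk hnd hlen
    simp only [List.foldl_cons]
    rcases List.mem_cons.mp hk with h | h
    · subst h
      rw [getD_foldl_set_not_mem _ _ _ _ (by simpa using (List.nodup_cons.mp hnd).1)]
      simp [List.getD_eq_getElem?_getD, List.getElem?_set_self, hlen]
    · exact ih _ h (List.nodup_cons.mp hnd).2 (by simpa using hlen)

theorem popLoop_eq (arr : List Int) (k : Nat) : ∀ (s : List Nat) (res : List Int),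
    popLoop arr res s k =
      ((s.takeWhile (fun j => arr.getD k 0 > arr.getD j 0)).foldl
        (fun r t => r.set t ((k : Nat) : Int)) res,
       s.dropWhile (fun j => arr.getD k 0 > arr.getD j 0)) := by
  intro s
  induction s with
  | nil => intro res; rfl
  | cons t ts ih =>
    intro res
    by_cases h : arr.getD k 0 > arr.getD t 0
    · rw [List.takeWhile_cons_of_pos (by simpa using h), List.dropWhile_cons_of_pos (by simpa using h)]
      rw [show popLoop arr res (t :: ts) k = popLoop arr (res.set t ((k : Nat) : Int)) ts k from by
        simp only [popLoop]; rw [if_pos h]]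
      rw [ih, List.foldl_cons]
    · rw [List.takeWhile_cons_of_neg (by simpa using h), List.dropWhile_cons_of_neg (by simpa using h)]
      simp only [popLoop]; rw [if_neg h, List.foldl_nil]

theorem dropWhile_all_false {α : Type} (c : α → Bool) (r : α → α → Prop) :
    ∀ (l : List α), List.Pairwise r l →
    (∀ a ∈ l, ∀ b ∈ l, r a b → c a = false → c b = false) →
    ∀ j ∈ l.dropWhile c, c j = false := by
  intro l
  induction l with
  | nil => intro _ _ j hj; simp at hj
  | cons a t ih =>
    intro hpw hmono j hj
    by_cases ha : c a
    · rw [List.dropWhile_cons_of_pos ha] at hj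
      exact ih (List.pairwise_cons.mp hpw).2
        (fun x hx y hy => hmono x (List.mem_cons_of_mem _ hx) y (List.mem_cons_of_mem _ hy)) j hj
    · rw [List.dropWhile_cons_of_neg ha] at hj
      have ha' : c a = false := by simpa using ha
      rcases List.mem_cons.mp hj with h | h
      · subst h; exact ha'
      · exact hmono a List.mem_cons_self j (List.mem_cons_of_mem _ h)
          ((List.pairwise_cons.mp hpw).1 j h) ha'

-- invariant of A's left-boundary dict pass
theorem lbState_inv (rank : List Int) (n : Nat) : ∀ k, k ≤ n →
    (((List.range k).foldl (boundStep rank) (List.replicate n (-1 : Int), PySem.Dict.empty)).1.length = n) ∧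
    (∀ i, i < n →
      ((List.range k).foldl (boundStep rank) (List.replicate n (-1 : Int), PySem.Dict.empty)).1.getD i 0 =
        if i < k then prevMatch rank (fun x => x == rank.getD i 0 + 1) i else -1) ∧
    (∀ v : Int,
      ((List.range k).foldl (boundStep rank) (List.replicate n (-1 : Int), PySem.Dict.empty)).2.get? v =
        if prevMatch rank (fun x => x == v) k = -1 then none
        else some (prevMatch rank (fun x => x == v) k)) := by
  intro k
  induction k with
  | zero =>
    intro _
    refine ⟨by simp, fun i hi => ?_, fun v => ?_⟩
    · simp [List.getD_eq_getElem?_getD, List.getElem?_replicate, hi]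
    · simp [prevMatch, PySem.Dict.get?_empty]
  | succ k ih =>
    intro hk1
    obtain ⟨hlen, hres, hmp⟩ := ih (by omega)
    rw [List.range_succ, List.foldl_append, List.foldl_cons, List.foldl_nil]
    set st := (List.range k).foldl (boundStep rank) (List.replicate n (-1 : Int), PySem.Dict.empty) with hst
    have hkn : k < n := hk1
    have hdict : ∀ v : Int, (st.2.insert (rank.getD k 0) ((k : Nat) : Int)).get? v =
        if prevMatch rank (fun x => x == v) (k + 1) = -1 then none
        else some (prevMatch rank (fun x => x == v) (k + 1)) := by
      intro v
      by_cases hv : v = rank.getD k 0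
      · rw [hv, PySem.Dict.get?_insert_self]
        have hpm1 : prevMatch rank (fun x => x == rank.getD k 0) (k + 1) = ((k : Nat) : Int) := by
          simp [prevMatch]
        rw [hpm1, if_neg (by omega)]
      · rw [PySem.Dict.get?_insert_of_ne _ _ hv]
        have hne : (rank.getD k 0 == v) = false := by
          simp only [beq_eq_false_iff_ne]; exact fun h => hv h.symm
        have hpm1 : prevMatch rank (fun x => x == v) (k + 1) = prevMatch rank (fun x => x == v) k := by
          simp only [prevMatch, hne, Bool.false_eq_true, if_false]
        rw [hpm1, hmp v]
    simp only [boundStep]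
    rw [hmp (rank.getD k 0 + 1)]
    by_cases hpm : prevMatch rank (fun x => x == rank.getD k 0 + 1) k = -1
    · rw [if_pos hpm]
      refine ⟨hlen, fun i hi => ?_, hdict⟩
      rcases Nat.lt_trichotomy i k with h | h | h
      · have h1 := hres i hi
        rw [if_pos h] at h1
        rw [h1, if_pos (by omega)]
      · subst h
        have h1 := hres i hi
        rw [if_neg (by omega)] at h1
        rw [h1, if_pos (by omega), hpm]
      · have h1 := hres i hi
        rw [if_neg (by omega)] at h1
        rw [h1, if_neg (by omega)]
    · rw [if_neg hpm]
      refine ⟨by simp [hlen], fun i hi => ?_, hdict⟩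
      by_cases hik : i = k
      · subst hik
        rw [List.getD_eq_getElem?_getD, List.getElem?_set_self (by omega)]
        simp [if_pos (by omega : i < i + 1)]
      · rw [List.getD_eq_getElem?_getD, List.getElem?_set_ne (fun h => hik h.symm),
            ← List.getD_eq_getElem?_getD, hres i hi]
        rcases Nat.lt_trichotomy i k with h | h | h
        · rw [if_pos h, if_pos (by omega)]
        · exact absurd h hik
        · rw [if_neg (by omega), if_neg (by omega)]

-- invariant of A's right-boundary dict pass (processing indices n-1 … k)
theorem rbState_inv (rank : List Int) (n : Nat) (hn : n = rank.length) : ∀ d k, k + d = n →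
    ((((List.range' k (n - k)).reverse).foldl (boundStep rank)
        (List.replicate n ((n : Nat) : Int), PySem.Dict.empty)).1.length = n) ∧
    (∀ i, i < n →
      (((List.range' k (n - k)).reverse).foldl (boundStep rank)
        (List.replicate n ((n : Nat) : Int), PySem.Dict.empty)).1.getD i 0 =
        if k ≤ i then nextMatch rank (fun x => x == rank.getD i 0 + 1) n (i + 1) else ((n : Nat) : Int)) ∧
    (∀ v : Int,
      (((List.range' k (n - k)).reverse).foldl (boundStep rank)
        (List.replicate n ((n : Nat) : Int), PySem.Dict.empty)).2.get? v =
        if nextMatch rank (fun x => x == v) n k = ((n : Nat) : Int) then none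
        else some (nextMatch rank (fun x => x == v) n k)) := by
  intro d
  induction d with
  | zero =>
    intro k hk
    have hkn : k = n := by omega
    subst hkn
    rw [Nat.sub_self]
    refine ⟨by simp, fun i hi => ?_, fun v => ?_⟩
    · rw [if_neg (by omega)]
      simp [List.getD_eq_getElem?_getD, hi]
    · rw [nextMatch_ge rank _ k k le_rfl, if_pos rfl]
      simp [PySem.Dict.get?_empty]
  | succ d ih =>
    intro k hk
    have hkn : k < n := by omega
    obtain ⟨hlen, hres, hmp⟩ := ih (k + 1) (by omega)
    have hsplit : (List.range' k (n - k)).reverse =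
        (List.range' (k + 1) (n - (k + 1))).reverse ++ [k] := by
      have h2 : n - k = (n - (k + 1)) + 1 := by omega
      rw [h2, List.range'_succ, List.reverse_cons]
    rw [hsplit, List.foldl_append, List.foldl_cons, List.foldl_nil]
    set st := ((List.range' (k + 1) (n - (k + 1))).reverse).foldl (boundStep rank)
      (List.replicate n ((n : Nat) : Int), PySem.Dict.empty) with hst
    have hdict : ∀ v : Int, (st.2.insert (rank.getD k 0) ((k : Nat) : Int)).get? v =
        if nextMatch rank (fun x => x == v) n k = ((n : Nat) : Int) then none
        else some (nextMatch rank (fun x => x == v) n k) := by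
      intro v
      by_cases hv : v = rank.getD k 0
      · rw [hv, PySem.Dict.get?_insert_self]
        have h1 : nextMatch rank (fun x => x == rank.getD k 0) n k = ((k : Nat) : Int) := by
          rw [nextMatch_unfold rank _ n k hkn]
          simp
        rw [h1, if_neg (by omega)]
      · rw [PySem.Dict.get?_insert_of_ne _ _ hv]
        have hne : (rank.getD k 0 == v) = false := by
          simp only [beq_eq_false_iff_ne]; exact fun h => hv h.symm
        have h1 : nextMatch rank (fun x => x == v) n k = nextMatch rank (fun x => x == v) n (k + 1) := by
          rw [nextMatch_unfold rank _ n k hkn]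
          simp only [hne, Bool.false_eq_true, if_false]
        rw [h1, hmp v]
    simp only [boundStep]
    rw [hmp (rank.getD k 0 + 1)]
    by_cases hpm : nextMatch rank (fun x => x == rank.getD k 0 + 1) n (k + 1) = ((n : Nat) : Int)
    · rw [if_pos hpm]
      refine ⟨hlen, fun i hi => ?_, hdict⟩
      rcases Nat.lt_trichotomy i k with h | h | h
      · have h1 := hres i hi
        rw [if_neg (by omega)] at h1
        rw [h1, if_neg (by omega)]
      · subst h
        have h1 := hres i hi
        rw [if_neg (by omega)] at h1
        rw [h1, if_pos (by omega), hpm]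
      · have h1 := hres i hi
        rw [if_pos (by omega)] at h1
        rw [h1, if_pos (by omega)]
    · rw [if_neg hpm]
      refine ⟨by simp [hlen], fun i hi => ?_, hdict⟩
      by_cases hik : i = k
      · subst hik
        rw [List.getD_eq_getElem?_getD, List.getElem?_set_self (by omega), if_pos (by omega)]
        simp
      · rw [List.getD_eq_getElem?_getD, List.getElem?_set_ne (fun h => hik h.symm),
            ← List.getD_eq_getElem?_getD, hres i hi]
        rcases Nat.lt_trichotomy i k with h | h | h
        · rw [if_neg (by omega), if_neg (by omega)]
        · exact absurd h hik
        · rw [if_pos (by omega), if_pos (by omega)]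

-- invariant of A's right next-greater stack pass
theorem ngeRState_inv (arr : List Int) (n : Nat) (hn : n = arr.length) : ∀ k, k ≤ n →
    (((List.range k).foldl (ngeStep arr) (List.replicate n ((n : Nat) : Int), [])).1.length = n) ∧
    (List.Pairwise (fun a b => b < a)
      ((List.range k).foldl (ngeStep arr) (List.replicate n ((n : Nat) : Int), [])).2) ∧
    (∀ j ∈ ((List.range k).foldl (ngeStep arr) (List.replicate n ((n : Nat) : Int), [])).2,
      j < k ∧ ∀ m, j < m → m < k → arr.getD m 0 ≤ arr.getD j 0) ∧
    (∀ j, j < k → j ∉ ((List.range k).foldl (ngeStep arr) (List.replicate n ((n : Nat) : Int), [])).2 →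
      ∃ m, j < m ∧ m < k ∧ arr.getD j 0 < arr.getD m 0) ∧
    (∀ j, j < n → (∀ m, j < m → m < k → arr.getD m 0 ≤ arr.getD j 0) →
      ((List.range k).foldl (ngeStep arr) (List.replicate n ((n : Nat) : Int), [])).1.getD j 0 = ((n : Nat) : Int)) ∧
    (∀ j, (∃ m, j < m ∧ m < k ∧ arr.getD j 0 < arr.getD m 0) →
      ((List.range k).foldl (ngeStep arr) (List.replicate n ((n : Nat) : Int), [])).1.getD j 0 =
        nextMatch arr (fun x => arr.getD j 0 < x) n (j + 1)) := by
  intro k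
  induction k with
  | zero =>
    intro _
    refine ⟨by simp, by simp, by simp, by omega, fun j hj _ => ?_, fun j hj => ?_⟩
    · simp [List.getD_eq_getElem?_getD, hj]
    · obtain ⟨m, h1, h2, h3⟩ := hj; omega
  | succ k ih =>
    intro hk1
    obtain ⟨hlen, hpw, hS, hC, hE1, hE2⟩ := ih (by omega)
    rw [List.range_succ, List.foldl_append, List.foldl_cons, List.foldl_nil]
    set st := (List.range k).foldl (ngeStep arr) (List.replicate n ((n : Nat) : Int), []) with hst
    have hkn : k < n := hk1
    simp only [ngeStep]
    rw [popLoop_eq]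
    have hmemtw : ∀ j ∈ st.2.takeWhile (fun j => arr.getD k 0 > arr.getD j 0), j ∈ st.2 :=
      fun j hj => (List.takeWhile_sublist _).mem hj
    have hmemdw : ∀ j ∈ st.2.dropWhile (fun j => arr.getD k 0 > arr.getD j 0), j ∈ st.2 :=
      fun j hj => (List.dropWhile_sublist _).mem hj
    have hnd : st.2.Nodup := List.Pairwise.imp (fun h => (Nat.ne_of_lt h).symm) hpw
    have hdrop_false : ∀ j ∈ st.2.dropWhile (fun j => arr.getD k 0 > arr.getD j 0),
        (arr.getD k 0 > arr.getD j 0) = False := by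
      intro j hj
      have := dropWhile_all_false (fun j => decide (arr.getD k 0 > arr.getD j 0))
        (fun a b => b < a) st.2 hpw ?_ j hj
      · simpa using this
      · intro a ha b hb hba hfa
        simp only [decide_eq_false_iff_not, not_lt] at hfa ⊢
        calc arr.getD k 0 ≤ arr.getD a 0 := hfa
          _ ≤ arr.getD b 0 := (hS b hb).2 a hba (hS a ha).1
    have hdropf : ∀ j ∈ st.2.dropWhile (fun j => arr.getD k 0 > arr.getD j 0),
        arr.getD k 0 ≤ arr.getD j 0 := by
      intro j hj
      have := hdrop_false j hj
      simp only [eq_iff_iff, iff_false, not_lt] at this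
      exact this
    have htwc : ∀ j ∈ st.2.takeWhile (fun j => arr.getD k 0 > arr.getD j 0),
        arr.getD j 0 < arr.getD k 0 := by
      intro j hj
      have := List.mem_takeWhile_imp hj
      simpa using this
    have hsplit2 := List.takeWhile_append_dropWhile
      (p := fun j => decide (arr.getD k 0 > arr.getD j 0)) (l := st.2)
    refine ⟨?_, ?_, ?_, ?_, ?_, ?_⟩
    · rw [length_foldl_set]; exact hlen
    · refine List.pairwise_cons.mpr ⟨fun b hb => (hS b (hmemdw b hb)).1, ?_⟩
      exact hpw.sublist (List.dropWhile_sublist _)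
    · intro j hj
      rcases List.mem_cons.mp hj with h | h
      · subst h; exact ⟨by omega, fun m h1 h2 => by omega⟩
      · obtain ⟨hjk, hjp⟩ := hS j (hmemdw j h)
        refine ⟨by omega, fun m h1 h2 => ?_⟩
        rcases Nat.lt_or_ge m k with hm | hm
        · exact hjp m h1 hm
        · have : m = k := by omega
          subst this
          exact hdropf j h
    · intro j hjk hnotin
      have hjne : j ≠ k := fun h => hnotin (h ▸ List.mem_cons_self)
      have hjk' : j < k := by omega
      by_cases hjs : j ∈ st.2
      · have : j ∈ st.2.takeWhile (fun j => arr.getD k 0 > arr.getD j 0) ∨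
            j ∈ st.2.dropWhile (fun j => arr.getD k 0 > arr.getD j 0) := by
          rw [← List.mem_append, hsplit2]; exact hjs
        rcases this with h | h
        · exact ⟨k, hjk', by omega, htwc j h⟩
        · exact absurd (List.mem_cons_of_mem _ h) hnotin
      · obtain ⟨m, h1, h2, h3⟩ := hC j hjk' hjs
        exact ⟨m, h1, by omega, h3⟩
    · intro j hj hno
      have hjtw : j ∉ st.2.takeWhile (fun j => arr.getD k 0 > arr.getD j 0) := by
        intro h
        have h1 := htwc j h
        have h2 : j < k := (hS j (hmemtw j h)).1
        have := hno k (by omega) (by omega)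
        omega
      rw [getD_foldl_set_not_mem _ _ _ _ hjtw]
      exact hE1 j hj (fun m h1 h2 => hno m h1 (by omega))
    · intro j hj
      obtain ⟨m, hm1, hm2, hm3⟩ := hj
      by_cases hjtw : j ∈ st.2.takeWhile (fun j => arr.getD k 0 > arr.getD j 0)
      · have hjs : j ∈ st.2 := hmemtw j hjtw
        have hjk : j < k := (hS j hjs).1
        have hjlt : arr.getD j 0 < arr.getD k 0 := htwc j hjtw
        rw [getD_foldl_set_mem _ _ _ _ hjtw
          ((List.takeWhile_sublist _).nodup hnd) (by omega)]
        refine (nextMatch_eq arr (fun x => arr.getD j 0 < x) n k hkn (by simpa using hjlt)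
          (j + 1) (by omega) ?_).symm
        intro m' h1 h2
        simp only [decide_eq_false_iff_not, not_lt]
        exact (hS j hjs).2 m' (by omega) h2
      · rw [getD_foldl_set_not_mem _ _ _ _ hjtw]
        by_cases hex : ∃ m', j < m' ∧ m' < k ∧ arr.getD j 0 < arr.getD m' 0
        · exact hE2 j hex
        · push_neg at hex
          have hmk : m = k := by
            rcases Nat.lt_or_ge m k with h | h
            · exact absurd hm3 (not_lt.mpr (by simpa using hex m hm1 h))
            · omega
          subst hmk
          have hjk : j < m := hm1
          have hjs : j ∈ st.2 := by
            by_contra hjs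
            obtain ⟨m', h1', h2', h3'⟩ := hC j hjk hjs
            exact absurd h3' (not_lt.mpr (hex m' h1' h2'))
          have : j ∈ st.2.takeWhile (fun j => arr.getD m 0 > arr.getD j 0) ∨
              j ∈ st.2.dropWhile (fun j => arr.getD m 0 > arr.getD j 0) := by
            rw [← List.mem_append, hsplit2]; exact hjs
          rcases this with h | h
          · exact absurd h hjtw
          · exact absurd hm3 (not_lt.mpr (hdropf j h))

-- invariant of A's left next-greater stack pass (processing indices n-1 … k)
theorem ngeLState_inv (arr : List Int) (n : Nat) (hn : n = arr.length) : ∀ d k, k + d = n →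
    ((((List.range' k (n - k)).reverse).foldl (ngeStep arr) (List.replicate n (-1 : Int), [])).1.length = n) ∧
    (List.Pairwise (fun a b => a < b)
      (((List.range' k (n - k)).reverse).foldl (ngeStep arr) (List.replicate n (-1 : Int), [])).2) ∧
    (∀ j ∈ (((List.range' k (n - k)).reverse).foldl (ngeStep arr) (List.replicate n (-1 : Int), [])).2,
      k ≤ j ∧ j < n ∧ ∀ m, k ≤ m → m < j → arr.getD m 0 ≤ arr.getD j 0) ∧
    (∀ j, k ≤ j → j < n →
      j ∉ (((List.range' k (n - k)).reverse).foldl (ngeStep arr) (List.replicate n (-1 : Int), [])).2 →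
      ∃ m, k ≤ m ∧ m < j ∧ arr.getD j 0 < arr.getD m 0) ∧
    (∀ j, j < n → (∀ m, k ≤ m → m < j → arr.getD m 0 ≤ arr.getD j 0) →
      (((List.range' k (n - k)).reverse).foldl (ngeStep arr) (List.replicate n (-1 : Int), [])).1.getD j 0 = -1) ∧
    (∀ j, j < n → (∃ m, k ≤ m ∧ m < j ∧ arr.getD j 0 < arr.getD m 0) →
      (((List.range' k (n - k)).reverse).foldl (ngeStep arr) (List.replicate n (-1 : Int), [])).1.getD j 0 =
        prevMatch arr (fun x => arr.getD j 0 < x) j) := by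
  intro d
  induction d with
  | zero =>
    intro k hk
    have hkn : k = n := by omega
    subst hkn
    rw [Nat.sub_self]
    refine ⟨by simp, by simp, by simp, fun j h1 h2 _ => by omega, fun j hj _ => ?_, fun j hj h => ?_⟩
    · simp [List.getD_eq_getElem?_getD, hj]
    · obtain ⟨m, h1, h2, h3⟩ := h; omega
  | succ d ih =>
    intro k hk
    have hkn : k < n := by omega
    obtain ⟨hlen, hpw, hS, hC, hE1, hE2⟩ := ih (k + 1) (by omega)
    have hsplit : (List.range' k (n - k)).reverse =
        (List.range' (k + 1) (n - (k + 1))).reverse ++ [k] := by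
      have h2 : n - k = (n - (k + 1)) + 1 := by omega
      rw [h2, List.range'_succ, List.reverse_cons]
    rw [hsplit, List.foldl_append, List.foldl_cons, List.foldl_nil]
    set st := ((List.range' (k + 1) (n - (k + 1))).reverse).foldl (ngeStep arr)
      (List.replicate n (-1 : Int), []) with hst
    simp only [ngeStep]
    rw [popLoop_eq]
    have hmemtw : ∀ j ∈ st.2.takeWhile (fun j => arr.getD k 0 > arr.getD j 0), j ∈ st.2 :=
      fun j hj => (List.takeWhile_sublist _).mem hj
    have hmemdw : ∀ j ∈ st.2.dropWhile (fun j => arr.getD k 0 > arr.getD j 0), j ∈ st.2 :=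
      fun j hj => (List.dropWhile_sublist _).mem hj
    have hnd : st.2.Nodup := List.Pairwise.imp (fun h => Nat.ne_of_lt h) hpw
    have hdropf : ∀ j ∈ st.2.dropWhile (fun j => arr.getD k 0 > arr.getD j 0),
        arr.getD k 0 ≤ arr.getD j 0 := by
      intro j hj
      have := dropWhile_all_false (fun j => decide (arr.getD k 0 > arr.getD j 0))
        (fun a b => a < b) st.2 hpw ?_ j hj
      · simpa using this
      · intro a ha b hb hab hfa
        simp only [decide_eq_false_iff_not, not_lt] at hfa ⊢
        calc arr.getD k 0 ≤ arr.getD a 0 := hfa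
          _ ≤ arr.getD b 0 := (hS b hb).2.2 a (hS a ha).1 hab
    have htwc : ∀ j ∈ st.2.takeWhile (fun j => arr.getD k 0 > arr.getD j 0),
        arr.getD j 0 < arr.getD k 0 := by
      intro j hj
      have := List.mem_takeWhile_imp hj
      simpa using this
    have hsplit2 := List.takeWhile_append_dropWhile
      (p := fun j => decide (arr.getD k 0 > arr.getD j 0)) (l := st.2)
    refine ⟨?_, ?_, ?_, ?_, ?_, ?_⟩
    · rw [length_foldl_set]; exact hlen
    · refine List.pairwise_cons.mpr ⟨fun b hb => by have := (hS b (hmemdw b hb)).1; omega, ?_⟩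
      exact hpw.sublist (List.dropWhile_sublist _)
    · intro j hj
      rcases List.mem_cons.mp hj with h | h
      · subst h; exact ⟨le_rfl, hkn, fun m h1 h2 => by omega⟩
      · obtain ⟨hjk, hjn, hjp⟩ := hS j (hmemdw j h)
        refine ⟨by omega, hjn, fun m h1 h2 => ?_⟩
        rcases Nat.lt_or_ge m (k + 1) with hm | hm
        · have : m = k := by omega
          subst this
          exact hdropf j h
        · exact hjp m hm h2
    · intro j hjk hjn hnotin
      have hjne : j ≠ k := fun h => hnotin (h ▸ List.mem_cons_self)
      have hjk' : k + 1 ≤ j := by omega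
      by_cases hjs : j ∈ st.2
      · have : j ∈ st.2.takeWhile (fun j => arr.getD k 0 > arr.getD j 0) ∨
            j ∈ st.2.dropWhile (fun j => arr.getD k 0 > arr.getD j 0) := by
          rw [← List.mem_append, hsplit2]; exact hjs
        rcases this with h | h
        · exact ⟨k, le_rfl, by omega, htwc j h⟩
        · exact absurd (List.mem_cons_of_mem _ h) hnotin
      · obtain ⟨m, h1, h2, h3⟩ := hC j hjk' hjn hjs
        exact ⟨m, by omega, h2, h3⟩
    · intro j hj hno
      have hjtw : j ∉ st.2.takeWhile (fun j => arr.getD k 0 > arr.getD j 0) := by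
        intro h
        have h1 := htwc j h
        have h2 : k + 1 ≤ j := (hS j (hmemtw j h)).1
        have := hno k (by omega) (by omega)
        omega
      rw [getD_foldl_set_not_mem _ _ _ _ hjtw]
      exact hE1 j hj (fun m h1 h2 => hno m (by omega) h2)
    · intro j hjn hj
      obtain ⟨m, hm1, hm2, hm3⟩ := hj
      by_cases hjtw : j ∈ st.2.takeWhile (fun j => arr.getD k 0 > arr.getD j 0)
      · have hjs : j ∈ st.2 := hmemtw j hjtw
        have hjk : k + 1 ≤ j := (hS j hjs).1
        have hjlt : arr.getD j 0 < arr.getD k 0 := htwc j hjtw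
        rw [getD_foldl_set_mem _ _ _ _ hjtw
          ((List.takeWhile_sublist _).nodup hnd) (by omega)]
        refine (prevMatch_eq arr (fun x => arr.getD j 0 < x) k j (by omega)
          (by simpa using hjlt) ?_).symm
        intro m' h1 h2
        simp only [decide_eq_false_iff_not, not_lt]
        exact (hS j hjs).2.2 m' (by omega) h2
      · rw [getD_foldl_set_not_mem _ _ _ _ hjtw]
        by_cases hex : ∃ m', k + 1 ≤ m' ∧ m' < j ∧ arr.getD j 0 < arr.getD m' 0
        · exact hE2 j hjn hex
        · push_neg at hex
          have hmk : m = k := by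
            rcases Nat.lt_or_ge m (k + 1) with h | h
            · omega
            · exact absurd hm3 (not_lt.mpr (by simpa using hex m h hm2))
          subst hmk
          have hjs : j ∈ st.2 := by
            by_contra hjs
            obtain ⟨m', h1', h2', h3'⟩ := hC j (by omega) hjn hjs
            exact absurd h3' (not_lt.mpr (hex m' h1' h2'))
          have : j ∈ st.2.takeWhile (fun j => arr.getD m 0 > arr.getD j 0) ∨
              j ∈ st.2.dropWhile (fun j => arr.getD m 0 > arr.getD j 0) := by
            rw [← List.mem_append, hsplit2]; exact hjs
          rcases this with h | h
          · exact absurd h hjtw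
          · exact absurd hm3 (not_lt.mpr (hdropf j h))

-- the four arrays, pointwise
theorem leftBoundary_getD (rank : List Int) (i : Nat) (hi : i < rank.length) :
    (leftBoundary rank).getD i 0 = prevMatch rank (fun x => x == rank.getD i 0 + 1) i := by
  have h := (lbState_inv rank rank.length rank.length le_rfl).2.1 i hi
  simpa [leftBoundary, hi] using h

theorem rightBoundary_getD (rank : List Int) (i : Nat) (hi : i < rank.length) :
    (rightBoundary rank).getD i 0 = nextMatch rank (fun x => x == rank.getD i 0 + 1) rank.length (i + 1) := by
  have h := (rbState_inv rank rank.length rfl rank.length 0 (by omega)).2.1 i hi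
  simpa [rightBoundary, List.range_eq_range'] using h

theorem nextGreatRight_getD (arr : List Int) (j : Nat) (hj : j < arr.length) :
    (nextGreatRight arr).getD j 0 = nextMatch arr (fun x => arr.getD j 0 < x) arr.length (j + 1) := by
  have h := ngeRState_inv arr arr.length rfl arr.length le_rfl
  by_cases hex : ∃ m, j < m ∧ m < arr.length ∧ arr.getD j 0 < arr.getD m 0
  · simpa [nextGreatRight] using h.2.2.2.2.2 j hex
  · push_neg at hex
    have h1 : (nextGreatRight arr).getD j 0 = ((arr.length : Nat) : Int) := by
      simpa [nextGreatRight] using h.2.2.2.2.1 j hj (fun m h1 h2 => hex m h1 h2)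
    rw [h1, nextMatch_eq_n]
    intro m h1 h2
    simpa using hex m (by omega) h2

theorem nextGreatLeft_getD (arr : List Int) (j : Nat) (hj : j < arr.length) :
    (nextGreatLeft arr).getD j 0 = prevMatch arr (fun x => arr.getD j 0 < x) j := by
  have h := ngeLState_inv arr arr.length rfl arr.length 0 (by omega)
  by_cases hex : ∃ m, 0 ≤ m ∧ m < j ∧ arr.getD j 0 < arr.getD m 0
  · simpa [nextGreatLeft, List.range_eq_range'] using h.2.2.2.2.2 j hj hex
  · push_neg at hex
    have h1 : (nextGreatLeft arr).getD j 0 = -1 := by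
      simpa [nextGreatLeft, List.range_eq_range'] using
        h.2.2.2.2.1 j hj (fun m h1 h2 => hex m h1 h2)
    rw [h1, prevMatch_eq_neg]
    intro m hm
    simpa using hex m (Nat.zero_le m) hm

-- ===== VERDICT (by name: the statement is the Claim_ definition above) =====
theorem solve_spec : Claim_equal_solve := by
  intro rank _
  unfold Spec_solve solve solve_alt
  apply List.foldl_ext
  intro acc i hi
  have hi' : i < rank.length := List.mem_range.mp hi
  rw [leftBoundary_getD rank i hi', rightBoundary_getD rank i hi',
      nextGreatRight_getD rank i hi', nextGreatLeft_getD rank i hi']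
  ring
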